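-- pv_equiv track=rewrite | github.com/cuc496/Analysis-of-Active-measurement | main.py | intersectwithPd
-- ===== SOURCE A (Python) =====
-- def intersectwithPd(Upaths, datapaths):
--     linksPd = []
--     res = 0
--     for p in datapaths:
--         for l in p:
--             if l not in linksPd:
--                 linksPd.append(l)
--
--     for p in Upaths:
--         isinPd = False
--         for l in p:
--             if l in linksPd:
--                 isinPd = True
--                 break
--         if isinPd:
--             res += 1
--     return res
-- ===== SOURCE B (Python) =====
-- def intersectwithPd(Upaths, datapaths):
--     # Inverted index: link -> set of Upath indices containing that link.
--     index = {}
--     for i, p in enumerate(Upaths):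
--         for l in p:
--             index.setdefault(l, set()).add(i)
--     matched = set()
--     for p in datapaths:
--         for l in p:
--             if l in index:
--                 matched |= index[l]
--     return len(matched)
-- ===== Notes on version B (the rewrite author's own statement) =====
-- stated objective: faster
-- what changed: Replaces A's dedup-list of datapath links (linear membership scans) plus a per-Upath inner scan of that list with an inverted hash index (link -> set of Upath indices) built once over the Upaths; the count is obtained by scanning the datapath links and taking the union of the matched index sets.
import Mathlib
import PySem

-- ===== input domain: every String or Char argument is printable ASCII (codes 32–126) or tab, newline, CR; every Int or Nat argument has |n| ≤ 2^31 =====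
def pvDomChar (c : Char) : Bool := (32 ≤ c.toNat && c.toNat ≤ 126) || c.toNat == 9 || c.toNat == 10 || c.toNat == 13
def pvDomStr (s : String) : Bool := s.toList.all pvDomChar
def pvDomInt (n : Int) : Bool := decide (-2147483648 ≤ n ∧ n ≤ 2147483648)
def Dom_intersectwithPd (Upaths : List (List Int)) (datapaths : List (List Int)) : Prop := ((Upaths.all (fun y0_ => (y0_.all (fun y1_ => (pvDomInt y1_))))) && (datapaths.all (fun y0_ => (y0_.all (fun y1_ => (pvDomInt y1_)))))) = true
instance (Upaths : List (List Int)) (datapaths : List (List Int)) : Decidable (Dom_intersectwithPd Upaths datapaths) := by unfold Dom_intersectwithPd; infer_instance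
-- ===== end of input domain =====

-- B replaces A's dedup-list of datapath links + per-Upath inner scan by an inverted
-- index (link -> set of Upath indices) built once, then a scan of the datapath links
-- taking the union of matched index sets (alternative decomposition, same result).

-- ===== PORT A =====
-- inner 'for l in p: if l in linksPd: isinPd = True; break' loop (break = stop at first hit)
def pvHasLink : List Int → List Int → Bool
  | [], _ => false
  | l :: rest, links => if links.contains l then true else pvHasLink rest links

def intersectwithPd (Upaths : List (List Int)) (datapaths : List (List Int)) : Int :=
  let linksPd : List Int :=
    datapaths.foldl
      (fun acc p => p.foldl (fun acc l => if acc.contains l then acc else acc ++ [l]) acc) []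
  Upaths.foldl (fun res p => if pvHasLink p linksPd then res + 1 else res) 0

-- ===== PORT B =====
-- index.setdefault(l, set()).add(i)  =  modify l ∅ (·.add i)
def pvBuildIndex (Upaths : List (List Int)) : PySem.Dict Int (PySem.Set Int) :=
  (PySem.List.enumerate Upaths).foldl
    (fun d ip => ip.2.foldl (fun d l => d.modify l PySem.Set.empty (fun s => s.add ip.1)) d)
    PySem.Dict.empty

def intersectwithPd_alt (Upaths : List (List Int)) (datapaths : List (List Int)) : Int :=
  let index := pvBuildIndex Upaths
  let matched : PySem.Set Int :=
    datapaths.foldl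
      (fun m p => p.foldl
        (fun m l => if index.contains l then m.union (index.getD l PySem.Set.empty) else m) m)
      PySem.Set.empty
  PySem.Set.len matched

-- ===== PRECONDITION & SPEC =====
def Spec_intersectwithPd (Upaths : List (List Int)) (datapaths : List (List Int)) (out : Int) : Prop := out = intersectwithPd_alt Upaths datapaths
instance (Upaths : List (List Int)) (datapaths : List (List Int)) (out : Int) : Decidable (Spec_intersectwithPd Upaths datapaths out) := by unfold Spec_intersectwithPd; infer_instance

-- ===== CLAIM (what is proved, stated in full; the proofs are below) =====
def Claim_equal_intersectwithPd : Prop := ∀ (Upaths : List (List Int)) (datapaths : List (List Int)), Dom_intersectwithPd Upaths datapaths → Spec_intersectwithPd Upaths datapaths (intersectwithPd Upaths datapaths)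

-- ===== LEMMAS AND PROOFS =====

-- A side -----------------------------------------------------------------

theorem pvHasLink_iff (p links : List Int) :
    pvHasLink p links = true ↔ ∃ l ∈ p, l ∈ links := by
  induction p with
  | nil => simp [pvHasLink]
  | cons a rest ih =>
    by_cases h : a ∈ links
    · simp [pvHasLink, h]
    · simp [pvHasLink, h, ih]

theorem pvLinksPd_eq (datapaths : List (List Int)) :
    datapaths.foldl
      (fun acc p => p.foldl (fun acc l => if acc.contains l then acc else acc ++ [l]) acc) [] =
    PySem.Set.ofList datapaths.flatten := by
  rw [PySem.Set.ofList_eq_foldl, List.foldl_flatten]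
  rfl

theorem intersectwithPd_eq_countP (Upaths datapaths : List (List Int)) :
    intersectwithPd Upaths datapaths =
      (Upaths.countP (fun p => decide (∃ l ∈ p, l ∈ datapaths.flatten)) : Int) := by
  unfold intersectwithPd
  rw [PySem.List.foldl_count_if, pvLinksPd_eq]
  have h : List.countP (fun p => pvHasLink p (PySem.Set.ofList datapaths.flatten)) Upaths
      = List.countP (fun p => decide (∃ l ∈ p, l ∈ datapaths.flatten)) Upaths :=
    List.countP_congr (fun p _ => by simp [pvHasLink_iff, PySem.Set.mem_ofList])
  rw [h]
  ring

-- B side -----------------------------------------------------------------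

-- inner index-building loop over one path p of index i
theorem pvInner_getD (p : List Int) (i : Int) (d : PySem.Dict Int (PySem.Set Int)) (l' : Int) :
    (p.foldl (fun d l => d.modify l PySem.Set.empty (fun s => s.add i)) d).getD l' PySem.Set.empty
      = if l' ∈ p then (d.getD l' PySem.Set.empty).add i else d.getD l' PySem.Set.empty := by
  induction p generalizing d with
  | nil => simp
  | cons a rest ih =>
    simp only [List.foldl_cons, ih, PySem.Dict.getD_modify]
    by_cases hm : l' ∈ rest <;> by_cases ha : l' = a
    · simp [ha]
    · simp [ha, hm]
    · simp [ha]
    · simp [ha, hm]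

theorem pvBuild_getD_mem (Upaths : List (List Int)) (s : Int)
    (d : PySem.Dict Int (PySem.Set Int)) (l' i : Int) :
    i ∈ ((PySem.List.enumerate Upaths s).foldl
          (fun d ip => ip.2.foldl (fun d l => d.modify l PySem.Set.empty (fun s => s.add ip.1)) d)
          d).getD l' PySem.Set.empty
      ↔ i ∈ d.getD l' PySem.Set.empty ∨
          ∃ (k : Nat), ∃ (h : k < Upaths.length), i = s + k ∧ l' ∈ Upaths[k] := by
  induction Upaths generalizing s d with
  | nil => simp [PySem.List.enumerate]
  | cons p rest ih =>
    rw [PySem.List.enumerate_cons, List.foldl_cons, ih]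
    rw [pvInner_getD]
    constructor
    · rintro (h | ⟨k, hk, rfl, hmem⟩)
      · by_cases hp : l' ∈ p
        · rw [if_pos hp, PySem.Set.mem_add] at h
          rcases h with h | rfl
          · exact Or.inl h
          · exact Or.inr ⟨0, by simp, by simp [hp]⟩
        · rw [if_neg hp] at h; exact Or.inl h
      · exact Or.inr ⟨k + 1, by simp only [List.length_cons] at hk ⊢; omega,
          by push_cast; ring, by simpa using hmem⟩
    · rintro (h | ⟨k, hk, rfl, hmem⟩)
      · by_cases hp : l' ∈ p
        · exact Or.inl (by rw [if_pos hp, PySem.Set.mem_add]; exact Or.inl h)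
        · exact Or.inl (by rwa [if_neg hp])
      · match k with
        | 0 =>
          refine Or.inl ?_
          have hp : l' ∈ p := by simpa using hmem
          rw [if_pos hp, PySem.Set.mem_add]
          exact Or.inr (by push_cast; ring)
        | k + 1 =>
          refine Or.inr ⟨k, by simp only [List.length_cons] at hk; omega,
            by push_cast; ring, by simpa using hmem⟩

-- the matched-set loop, flattened
theorem pvMatched_mem (index : PySem.Dict Int (PySem.Set Int)) (ls : List Int)
    (m : PySem.Set Int) (i : Int) :
    i ∈ ls.foldl
        (fun m l => if index.contains l then m.union (index.getD l PySem.Set.empty) else m) m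
      ↔ i ∈ m ∨ ∃ l ∈ ls, i ∈ index.getD l PySem.Set.empty := by
  induction ls generalizing m with
  | nil => simp
  | cons a rest ih =>
    by_cases h : index.contains a
    · rw [List.foldl_cons, if_pos h, ih]
      simp only [PySem.Set.mem_union, List.mem_cons]
      constructor
      · rintro (⟨hm | hi⟩ | ⟨l, hl, hi⟩)
        · exact Or.inl hm
        · exact Or.inr ⟨a, Or.inl rfl, hi⟩
        · exact Or.inr ⟨l, Or.inr hl, hi⟩
      · rintro (hm | ⟨l, rfl | hl, hi⟩)
        · exact Or.inl (Or.inl hm)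
        · exact Or.inl (Or.inr hi)
        · exact Or.inr ⟨l, hl, hi⟩
    · have h0 : index.getD a PySem.Set.empty = PySem.Set.empty :=
        PySem.Dict.getD_of_not_contains _ _ (by simpa using h)
      rw [List.foldl_cons, if_neg h, ih]
      simp only [List.mem_cons]
      constructor
      · rintro (hm | ⟨l, hl, hi⟩)
        · exact Or.inl hm
        · exact Or.inr ⟨l, Or.inr hl, hi⟩
      · rintro (hm | ⟨l, rfl | hl, hi⟩)
        · exact Or.inl hm
        · rw [h0] at hi; exact absurd hi (List.not_mem_nil)
        · exact Or.inr ⟨l, hl, hi⟩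

theorem pvMatched_nodup (index : PySem.Dict Int (PySem.Set Int)) (ls : List Int)
    (m : PySem.Set Int) (hm : m.Nodup) :
    (ls.foldl
        (fun m l => if index.contains l then m.union (index.getD l PySem.Set.empty) else m)
        m).Nodup := by
  induction ls generalizing m with
  | nil => simpa
  | cons a rest ih =>
    rw [List.foldl_cons]
    by_cases h : index.contains a
    · rw [if_pos h]; exact ih _ (PySem.Set.nodup_union _ _ hm)
    · rw [if_neg h]; exact ih _ hm

-- counting ----------------------------------------------------------------

theorem pvCountP_eq_length_filter_range (xs : List (List Int)) (sh : List Int → Bool) :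
    xs.countP sh = ((List.range xs.length).filter (fun k => sh (xs.getD k []))).length := by
  induction xs with
  | nil => simp
  | cons p rest ih =>
    simp only [List.length_cons, List.range_succ_eq_map, List.filter_cons, List.filter_map]
    by_cases h : sh p
    · simp [h, ih, Function.comp_def]
    · simp [h, ih, Function.comp_def]

-- main --------------------------------------------------------------------

theorem pvMain (Upaths datapaths : List (List Int)) :
    intersectwithPd Upaths datapaths = intersectwithPd_alt Upaths datapaths := by
  classical
  have halt : intersectwithPd_alt Upaths datapaths
      = ((datapaths.foldl
           (fun m p => p.foldl
             (fun m l => if (pvBuildIndex Upaths).contains l then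
                 m.union ((pvBuildIndex Upaths).getD l PySem.Set.empty) else m) m)
           PySem.Set.empty).length : Int) := rfl
  rw [intersectwithPd_eq_countP, halt]
  set flat := datapaths.flatten with hflat
  set index := pvBuildIndex Upaths with hindex
  set matched := datapaths.foldl
      (fun m p => p.foldl
        (fun m l => if index.contains l then m.union (index.getD l PySem.Set.empty) else m) m)
      PySem.Set.empty with hmatched
  have hemp : ∀ j : Int, j ∈ (PySem.Set.empty : PySem.Set Int) ↔ False := by
    simp [PySem.Set.empty]
  have hmem : ∀ i : Int, i ∈ matched ↔
      ∃ (k : Nat), ∃ (_ : k < Upaths.length), i = (k : Int) ∧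
        ∃ l ∈ Upaths.getD k [], l ∈ flat := by
    intro i
    rw [hmatched, ← List.foldl_flatten, pvMatched_mem]
    simp only [hemp, false_or]
    constructor
    · rintro ⟨l, hl, hil⟩
      rw [hindex] at hil
      unfold pvBuildIndex at hil
      rw [pvBuild_getD_mem] at hil
      rcases hil with h | ⟨k, hk, hik, hlk⟩
      · rw [PySem.Dict.getD_empty, hemp] at h; exact absurd h id
      · exact ⟨k, hk, by simpa using hik, l,
          by simp [List.getD_eq_getElem?_getD, List.getElem?_eq_getElem hk, hlk], hl⟩
    · rintro ⟨k, hk, rfl, l, hlk, hl⟩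
      refine ⟨l, hl, ?_⟩
      rw [hindex]; unfold pvBuildIndex; rw [pvBuild_getD_mem]
      exact Or.inr ⟨k, hk, by simp, by
        rwa [List.getD_eq_getElem?_getD, List.getElem?_eq_getElem hk] at hlk⟩
  have hnd : matched.Nodup := by
    rw [hmatched, ← List.foldl_flatten]
    exact pvMatched_nodup _ _ _ List.nodup_nil
  set L : List Int := ((List.range Upaths.length).filter
      (fun k => decide (∃ l ∈ Upaths.getD k [], l ∈ flat))).map (Nat.cast) with hL
  have hLnd : L.Nodup := by
    refine List.Nodup.map (fun a b h => by exact_mod_cast h) ?_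
    exact (List.nodup_range).filter _
  have hLmem : ∀ i : Int, i ∈ L ↔
      ∃ (k : Nat), ∃ (_ : k < Upaths.length), i = (k : Int) ∧
        ∃ l ∈ Upaths.getD k [], l ∈ flat := by
    intro i
    rw [hL]
    simp only [List.mem_map, List.mem_filter, List.mem_range, decide_eq_true_eq]
    constructor
    · rintro ⟨k, ⟨hk, hsh⟩, rfl⟩; exact ⟨k, hk, rfl, hsh⟩
    · rintro ⟨k, hk, rfl, hsh⟩; exact ⟨k, ⟨hk, hsh⟩, rfl⟩
  have hperm : matched.Perm L := by
    rw [List.perm_ext_iff_of_nodup hnd hLnd]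
    intro a; rw [hmem a, hLmem a]
  have hfin : ((List.range Upaths.length).filter
      (fun k => decide (∃ l ∈ Upaths.getD k [], l ∈ flat))).length = matched.length := by
    rw [hperm.length_eq, hL, List.length_map]
  rw [pvCountP_eq_length_filter_range Upaths (fun p => decide (∃ l ∈ p, l ∈ flat))]
  exact_mod_cast hfin

-- ===== VERDICT (by name: the statement is the Claim_ definition above) =====
theorem intersectwithPd_spec : Claim_equal_intersectwithPd := by
  intro Upaths datapaths _
  unfold Spec_intersectwithPd
  exact pvMain Upaths datapaths
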